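-- pv_equiv track=rewrite | github.com/ShuvalovAnthony/ez_python | Matvei/9/21592/21592.py | check
-- ===== SOURCE A (Python) =====
-- def check(row: list):
--     povtor = []
--     unique = []
--
--     for num in row:
--         if row.count(num) == 2:
--             povtor.append(num)
--         elif row.count(num) == 1:
--             unique.append(num)
--
--     return (
--         (len(povtor) == 6) and (len(unique) == 2) and
--         ((max(povtor) - min(povtor))**2 > 2*(unique[0]**2 + unique[1]**2))
--     )
-- ===== SOURCE B (Python) =====
-- def check(row: list):
--     # One pass: tally occurrences in a dict, then read off the duplicated
--     # and unique values from the tally (first-occurrence order).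
--     cnt = {}
--     for num in row:
--         cnt[num] = cnt.get(num, 0) + 1
--     dup = [v for v, c in cnt.items() if c == 2]
--     uniq = [v for v, c in cnt.items() if c == 1]
--     return (
--         len(dup) == 3 and len(uniq) == 2 and
--         (max(dup) - min(dup)) ** 2 > 2 * (uniq[0] ** 2 + uniq[1] ** 2)
--     )
-- ===== Notes on version B (the rewrite author's own statement) =====
-- stated objective: faster
-- what changed: Replaces the quadratic loop that calls row.count(num) for every element by a single counting pass into a dict, then derives the duplicated values (count 2, kept once so the length test is 3 instead of 6) and unique values from the tally.
import Mathlib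
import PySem

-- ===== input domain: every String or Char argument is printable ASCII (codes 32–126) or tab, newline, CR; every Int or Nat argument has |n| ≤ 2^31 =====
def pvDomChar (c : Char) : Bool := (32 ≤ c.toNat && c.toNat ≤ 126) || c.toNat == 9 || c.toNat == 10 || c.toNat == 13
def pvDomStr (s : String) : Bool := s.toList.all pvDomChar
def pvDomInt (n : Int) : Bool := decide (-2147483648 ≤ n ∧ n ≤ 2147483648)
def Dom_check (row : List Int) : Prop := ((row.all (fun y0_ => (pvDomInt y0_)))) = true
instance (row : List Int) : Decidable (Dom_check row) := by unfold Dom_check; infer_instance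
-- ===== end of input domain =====

-- B replaces A's quadratic per-element row.count scans by one counting pass
-- into a dict, reading duplicated/unique values off the tally (objective: faster).

-- ===== PORT A =====
def check (row : List Int) : Bool :=
  let st := row.foldl (fun (st : List Int × List Int) num =>
    if PySem.List.count row num = 2 then (st.1 ++ [num], st.2)
    else if PySem.List.count row num = 1 then (st.1, st.2 ++ [num])
    else st) ([], [])
  let povtor := st.1
  let unique := st.2
  -- Python's `and` short-circuits, so max/min/indexing run only when both length tests pass
  if povtor.length = 6 ∧ unique.length = 2 then
    (PySem.List.max? povtor (fun x => x)).elim false fun mx =>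
    (PySem.List.min? povtor (fun x => x)).elim false fun mn =>
    (PySem.List.pyGet? unique 0).elim false fun u0 =>
    (PySem.List.pyGet? unique 1).elim false fun u1 =>
      decide ((mx - mn) ^ 2 > 2 * (u0 ^ 2 + u1 ^ 2))
  else false

-- ===== PORT B =====
def check_alt (row : List Int) : Bool :=
  let cnt : PySem.Dict Int Int :=
    row.foldl (fun d num => d.insert num (d.getD num 0 + 1)) PySem.Dict.empty
  let dup := (cnt.items.filter (fun p => p.2 = 2)).map Prod.fst
  let uniq := (cnt.items.filter (fun p => p.2 = 1)).map Prod.fst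
  if dup.length = 3 ∧ uniq.length = 2 then
    (do
      let mx ← PySem.List.max? dup (fun x => x)
      let mn ← PySem.List.min? dup (fun x => x)
      let u0 ← PySem.List.pyGet? uniq 0
      let u1 ← PySem.List.pyGet? uniq 1
      pure (decide ((mx - mn) ^ 2 > 2 * (u0 ^ 2 + u1 ^ 2)))).getD false
  else false

-- ===== PRECONDITION & SPEC =====
def Spec_check (row : List Int) (out : Bool) : Prop := out = check_alt row
instance (row : List Int) (out : Bool) : Decidable (Spec_check row out) := by unfold Spec_check; infer_instance

-- ===== CLAIM (what is proved, stated in full; the proofs are below) =====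
def Claim_equal_check : Prop := ∀ (row : List Int), Dom_check row → Spec_check row (check row)

-- ===== LEMMAS AND PROOFS =====

-- A's loop is a pair of filters: each element lands in povtor (count 2) or unique (count 1)
theorem pvA_loop (row : List Int) :
    row.foldl (fun (st : List Int × List Int) num =>
      if PySem.List.count row num = 2 then (st.1 ++ [num], st.2)
      else if PySem.List.count row num = 1 then (st.1, st.2 ++ [num])
      else st) ([], [])
    = (row.filter (fun x => decide (PySem.List.count row x = 2)),
       row.filter (fun x => decide (PySem.List.count row x = 1))) := by
  rw [PySem.List.foldl_congr_mem row _
    (fun s e => (if PySem.List.count row e = 2 then s.1 ++ [e] else s.1,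
                 if PySem.List.count row e = 1 then s.2 ++ [e] else s.2))
    ([], []) ?_]
  · rw [PySem.List.foldl_prod_mk
      (f := fun a x => if PySem.List.count row x = 2 then a ++ [x] else a)
      (g := fun b x => if PySem.List.count row x = 1 then b ++ [x] else b),
      PySem.List.foldl_append_ite_eq_filter, PySem.List.foldl_append_ite_eq_filter]
    simp
  · intro acc x _
    by_cases h2 : PySem.List.count row x = 2 <;> by_cases h1 : PySem.List.count row x = 1 <;>
      first
      | (exfalso; omega)
      | (simp only [PySem.List.count] at h1 h2; simp [h1, h2])

theorem pvToFinset_ofList (row : List Int) :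
    (PySem.Set.ofList row).toFinset = row.toFinset := by
  ext a
  simp [List.mem_toFinset, PySem.Set.mem_ofList]

-- length of a filter whose kept elements all have the same multiplicity c in row
theorem pvFilterLen (row : List Int) (p : Int → Bool) (c : Nat)
    (h : ∀ x ∈ row, p x = true → List.count x row = c) :
    (row.filter p).length = c * ((PySem.Set.ofList row).filter p).length := by
  have hnd : ((PySem.Set.ofList row).filter p).Nodup :=
    (PySem.Set.nodup_ofList row).filter p
  have hfs : ((PySem.Set.ofList row).filter p).toFinset = (row.filter p).toFinset := by
    rw [List.toFinset_filter, List.toFinset_filter, pvToFinset_ofList]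
  have hsum : ∑ a ∈ (row.filter p).toFinset, (row.filter p).count a
      = ∑ _a ∈ (row.filter p).toFinset, c := by
    refine Finset.sum_congr rfl (fun a ha => ?_)
    obtain ⟨har, hpa⟩ := List.mem_filter.mp (List.mem_toFinset.mp ha)
    rw [List.count_filter hpa]
    exact h a har hpa
  calc (row.filter p).length
      = ∑ a ∈ (row.filter p).toFinset, (row.filter p).count a :=
        (List.sum_toFinset_count_eq_length _).symm
    _ = (row.filter p).toFinset.card * c := by rw [hsum, Finset.sum_const, smul_eq_mul]
    _ = c * ((PySem.Set.ofList row).filter p).length := by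
        rw [← hfs, List.toFinset_card_of_nodup hnd, Nat.mul_comm]

-- same members → same max (no key); same for min
theorem pvMaxEq (l l' : List Int) (hm : ∀ z, z ∈ l ↔ z ∈ l') (hne : l ≠ []) :
    PySem.List.max? l (fun x => x) = PySem.List.max? l' (fun x => x) := by
  obtain ⟨a, ha⟩ : ∃ a, PySem.List.max? l (fun x => x) = some a := by
    cases hl : PySem.List.max? l (fun x => x) with
    | none => exact absurd ((PySem.List.max?_eq_none_iff l _).mp hl) hne
    | some a => exact ⟨a, rfl⟩
  have hne' : l' ≠ [] := by
    intro h0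
    have := (hm a).mp (PySem.List.max?_mem ha)
    simp [h0] at this
  obtain ⟨b, hb⟩ : ∃ b, PySem.List.max? l' (fun x => x) = some b := by
    cases hl : PySem.List.max? l' (fun x => x) with
    | none => exact absurd ((PySem.List.max?_eq_none_iff l' _).mp hl) hne'
    | some b => exact ⟨b, rfl⟩
  have h1 : a ≤ b := PySem.List.max?_isMax hb a ((hm a).mp (PySem.List.max?_mem ha))
  have h2 : b ≤ a := PySem.List.max?_isMax ha b ((hm b).mpr (PySem.List.max?_mem hb))
  rw [ha, hb, le_antisymm h1 h2]

theorem pvMinEq (l l' : List Int) (hm : ∀ z, z ∈ l ↔ z ∈ l') (hne : l ≠ []) :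
    PySem.List.min? l (fun x => x) = PySem.List.min? l' (fun x => x) := by
  obtain ⟨a, ha⟩ : ∃ a, PySem.List.min? l (fun x => x) = some a := by
    cases hl : PySem.List.min? l (fun x => x) with
    | none => exact absurd ((PySem.List.min?_eq_none_iff l _).mp hl) hne
    | some a => exact ⟨a, rfl⟩
  have hne' : l' ≠ [] := by
    intro h0
    have := (hm a).mp (PySem.List.min?_mem ha)
    simp [h0] at this
  obtain ⟨b, hb⟩ : ∃ b, PySem.List.min? l' (fun x => x) = some b := by
    cases hl : PySem.List.min? l' (fun x => x) with
    | none => exact absurd ((PySem.List.min?_eq_none_iff l' _).mp hl) hne'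
    | some b => exact ⟨b, rfl⟩
  have h1 : a ≤ b := PySem.List.min?_isMin ha b ((hm b).mpr (PySem.List.min?_mem hb))
  have h2 : b ≤ a := PySem.List.min?_isMin hb a ((hm a).mp (PySem.List.min?_mem ha))
  rw [ha, hb, le_antisymm h1 h2]

-- two nodup 2-element lists with the same members have the same sum of squares
theorem pvPairSq (a b x y : Int) (hnd : a ≠ b) (_hnd' : x ≠ y)
    (hm : ∀ z : Int, (z = a ∨ z = b) ↔ (z = x ∨ z = y)) :
    x ^ 2 + y ^ 2 = a ^ 2 + b ^ 2 := by
  have ha := (hm a).mp (Or.inl rfl)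
  have hb := (hm b).mp (Or.inr rfl)
  rcases ha with h | h <;> rcases hb with h' | h'
  · exact absurd (h.trans h'.symm) hnd
  · rw [h, h']
  · rw [h, h']; ring
  · exact absurd (h.trans h'.symm) hnd

-- elements kept with multiplicity 1 occur once, so that filter is Nodup
theorem pvUniqueNodup (row : List Int) :
    (row.filter (fun x => decide (PySem.List.count row x = 1))).Nodup := by
  rw [List.nodup_iff_count_le_one]
  intro a
  by_cases hmem : a ∈ row.filter (fun x => decide (PySem.List.count row x = 1))
  · obtain ⟨_, hpa⟩ := List.mem_filter.mp hmem
    rw [List.count_filter (p := fun x => decide (PySem.List.count row x = 1)) hpa]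
    simp only [decide_eq_true_eq, PySem.List.count] at hpa
    omega
  · rw [List.count_eq_zero_of_not_mem hmem]
    omega

theorem pvPortsAgree (row : List Int) : check row = check_alt row := by
  simp only [check, check_alt]
  rw [pvA_loop, PySem.Dict.foldl_insert_getD_add_one_eq_counter, PySem.Dict.items_counter]
  simp only [List.filter_map, List.map_map]
  have hid : (Prod.fst ∘ fun k : Int => (k, (List.count k row : Int))) = id := rfl
  rw [hid]
  simp only [List.map_id]
  have hp2 : ((fun p : Int × Int => decide (p.2 = 2)) ∘ fun k : Int => (k, (List.count k row : Int)))
      = fun x => decide (PySem.List.count row x = 2) := by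
    funext x
    simp only [Function.comp, PySem.List.count]
    rw [decide_eq_decide]
    omega
  have hp1 : ((fun p : Int × Int => decide (p.2 = 1)) ∘ fun k : Int => (k, (List.count k row : Int)))
      = fun x => decide (PySem.List.count row x = 1) := by
    funext x
    simp only [Function.comp, PySem.List.count]
    rw [decide_eq_decide]
    omega
  rw [hp2, hp1]
  set q2 : Int → Bool := fun x => decide (PySem.List.count row x = 2) with hq2
  set q1 : Int → Bool := fun x => decide (PySem.List.count row x = 1) with hq1
  have hlen2 : (row.filter q2).length = 2 * ((PySem.Set.ofList row).filter q2).length := by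
    refine pvFilterLen row q2 2 (fun x _ hpx => ?_)
    rw [hq2] at hpx
    simpa [PySem.List.count] using hpx
  have hlen1 : (row.filter q1).length = 1 * ((PySem.Set.ofList row).filter q1).length := by
    refine pvFilterLen row q1 1 (fun x _ hpx => ?_)
    rw [hq1] at hpx
    simpa [PySem.List.count] using hpx
  by_cases hc : ((PySem.Set.ofList row).filter q2).length = 3 ∧
      ((PySem.Set.ofList row).filter q1).length = 2
  · rw [if_pos (by omega : (row.filter q2).length = 6 ∧ (row.filter q1).length = 2), if_pos hc]
    have hmemD : ∀ z, z ∈ row.filter q2 ↔ z ∈ (PySem.Set.ofList row).filter q2 := by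
      intro z
      simp [List.mem_filter, PySem.Set.mem_ofList]
    have hmemU : ∀ z, z ∈ row.filter q1 ↔ z ∈ (PySem.Set.ofList row).filter q1 := by
      intro z
      simp [List.mem_filter, PySem.Set.mem_ofList]
    have hPne : row.filter q2 ≠ [] := by
      intro h0
      have h0' : (row.filter q2).length = 0 := by rw [h0]; rfl
      omega
    have hDne : (PySem.Set.ofList row).filter q2 ≠ [] := by
      intro h0
      rw [h0] at hc
      simp at hc
    obtain ⟨mx, hmx⟩ : ∃ a, PySem.List.max? ((PySem.Set.ofList row).filter q2) (fun x => x) = some a := by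
      cases hl : PySem.List.max? ((PySem.Set.ofList row).filter q2) (fun x => x) with
      | none => exact absurd ((PySem.List.max?_eq_none_iff _ _).mp hl) hDne
      | some a => exact ⟨a, rfl⟩
    obtain ⟨mn, hmn⟩ : ∃ a, PySem.List.min? ((PySem.Set.ofList row).filter q2) (fun x => x) = some a := by
      cases hl : PySem.List.min? ((PySem.Set.ofList row).filter q2) (fun x => x) with
      | none => exact absurd ((PySem.List.min?_eq_none_iff _ _).mp hl) hDne
      | some a => exact ⟨a, rfl⟩
    obtain ⟨a, b, hU⟩ := List.length_eq_two.mp (by omega : (row.filter q1).length = 2)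
    obtain ⟨x, y, hV⟩ := List.length_eq_two.mp hc.2
    have hndU : (row.filter q1).Nodup := pvUniqueNodup row
    have hndV : ((PySem.Set.ofList row).filter q1).Nodup :=
      (PySem.Set.nodup_ofList row).filter q1
    have hab : a ≠ b := by
      rw [hU] at hndU
      simpa using hndU
    have hxy : x ≠ y := by
      rw [hV] at hndV
      simpa using hndV
    have hsum : x ^ 2 + y ^ 2 = a ^ 2 + b ^ 2 := by
      refine pvPairSq a b x y hab hxy (fun z => ?_)
      have := hmemU z
      rw [hU, hV] at this
      simpa using this
    rw [pvMaxEq _ _ hmemD hPne, pvMinEq _ _ hmemD hPne, hmx, hmn, hU, hV]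
    simp [PySem.List.pyGet?, PySem.List.pyIdx?, hsum]
  · rw [if_neg (by omega), if_neg hc]

-- ===== VERDICT (by name: the statement is the Claim_ definition above) =====
theorem check_spec : Claim_equal_check := by
  intro row _
  exact pvPortsAgree row
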